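-- pv_equiv track=rewrite | github.com/Lyhkd/cs336-assignment-1 | cs336_basics/tokenizer.py | split_on_special
-- ===== SOURCE A (Python) =====
-- from typing import Iterable, List
--
-- def split_on_special(text: str, special_tokens: List[str]) -> List[str]:
--     """按特殊标记切分，保证不跨特殊标记边界做 BPE 合并。使用最长匹配优先。"""
--     if not special_tokens:
--         return [text]
--
--     # 按长度降序排序，确保最长匹配优先
--     sorted_tokens = sorted(special_tokens, key=len, reverse=True)
--
--     result = []
--     i = 0
--     while i < len(text):
--         matched = False
--         # 尝试匹配每个特殊标记（已按长度排序）
--         for token in sorted_tokens: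
--             if text[i:i+len(token)] == token:
--                 result.append(token)
--                 i += len(token)
--                 matched = True
--                 break
--
--         if not matched:
--             # 找到下一个特殊标记的位置
--             next_special_pos = len(text)
--             for token in sorted_tokens:
--                 pos = text.find(token, i)
--                 if pos != -1 and pos < next_special_pos:
--                     next_special_pos = pos
--
--             # 添加普通文本
--             if next_special_pos > i:
--                 result.append(text[i:next_special_pos])
--                 i = next_special_pos
--             else:
--                 # 没有找到更多特殊标记，添加剩余文本
--                 result.append(text[i:])
--                 break
--
--     return [p for p in result if p != ""]
-- ===== SOURCE B (Python) =====
-- def split_on_special(text, special_tokens):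
--     """Single left-to-right character scan with a plain-text buffer: at each
--     position try the tokens longest-first; unmatched characters accumulate in
--     the buffer, which is flushed before every token and at the end. No
--     str.find / next-occurrence search and no final empty-piece filter."""
--     if not special_tokens:
--         return [text]
--     toks = sorted(special_tokens, key=len, reverse=True)
--     out, buf, i, n = [], [], 0, len(text)
--     while i < n:
--         for t in toks:
--             if text.startswith(t, i):
--                 if buf:
--                     out.append(''.join(buf))
--                     buf = []
--                 out.append(t)
--                 i += len(t)
--                 break
--         else:
--             buf.append(text[i])
--             i += 1
--     if buf:
--         out.append(''.join(buf))
--     return out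
-- ===== Notes on version B (the rewrite author's own statement) =====
-- stated objective: alternative
-- what changed: A jumps between matches by taking the minimum over str.find of every token and filters empty pieces afterwards; B never searches ahead: it scans the text one character at a time, attempting a longest-first token match at the current position and accumulating unmatched characters in a buffer flushed before each token and at the end, so no find/jump phase and no final filter exist.
-- outside the precondition, e.g. on split_on_special('a', ['', 'a']): A returns ['a'], B returns ['a']
import Mathlib
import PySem

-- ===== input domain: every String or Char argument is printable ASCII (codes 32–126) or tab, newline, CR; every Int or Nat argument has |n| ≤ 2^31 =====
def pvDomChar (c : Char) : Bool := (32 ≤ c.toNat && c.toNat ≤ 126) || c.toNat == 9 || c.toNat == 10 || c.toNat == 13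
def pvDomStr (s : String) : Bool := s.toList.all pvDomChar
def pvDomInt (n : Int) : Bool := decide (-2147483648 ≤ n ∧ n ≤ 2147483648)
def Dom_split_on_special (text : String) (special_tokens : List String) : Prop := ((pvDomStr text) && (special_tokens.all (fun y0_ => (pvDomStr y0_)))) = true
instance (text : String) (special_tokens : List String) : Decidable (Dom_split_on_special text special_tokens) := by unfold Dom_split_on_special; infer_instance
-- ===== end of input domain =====

-- B replaces A's find/jump scheme (minimum over str.find of every token, plus a final empty-piece
-- filter) by a single character-by-character scan with a plain-text buffer; objective: alternative.
-- ===== PORT A =====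
-- inner loop "for token in sorted_tokens: if text[i:i+len(token)] == token" (first match wins)
def pvAmatchTok : List (List Char) → List Char → Int → Option (List Char)
  | [], _, _ => none
  | t :: ts, s, i =>
      if PySem.List.slice s (some i) (some (i + (t.length : Int))) = t then some t
      else pvAmatchTok ts s i

-- "next_special_pos = len(text); for token: pos = text.find(token, i); if pos != -1 and pos < next_special_pos"
def pvAfindNext (s : List Char) (toks : List (List Char)) (i : Int) : Int :=
  toks.foldl (fun acc t =>
    let pos := PySem.Chars.findFrom s t i none
    if pos ≠ -1 ∧ pos < acc then pos else acc) (s.length : Int)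

-- the "while i < len(text)" loop; fuel makes it total (A loops forever on an empty token with nonempty text, outside Pre_)
def pvAloop : Nat → List Char → List (List Char) → Int → List (List Char) → List (List Char)
  | 0, _, _, _, result => result
  | fuel+1, s, toks, i, result =>
    if i < (s.length : Int) then
      match pvAmatchTok toks s i with
      | some t => pvAloop fuel s toks (i + (t.length : Int)) (result ++ [t])
      | none =>
        let nsp := pvAfindNext s toks i
        if i < nsp then
          pvAloop fuel s toks nsp (result ++ [PySem.List.slice s (some i) (some nsp)])
        else result ++ [PySem.List.slice s (some i) none]
    else result

def split_on_special (text : String) (special_tokens : List String) : List String :=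
  if special_tokens = [] then [text]
  else
    let sorted_tokens := PySem.List.sorted special_tokens (fun t => PySem.Str.len t) true
    let s := text.toList
    let toks := sorted_tokens.map String.toList
    let result := pvAloop (s.length + 1) s toks 0 []
    (result.filter (fun p => p ≠ [])).map (fun p => String.ofList p)

-- ===== PORT B =====
-- the "while i < n" scan of B; fuel makes it total (B loops forever on an empty token with nonempty
-- text, outside Pre_).  "text.startswith(t, i)" with 0 ≤ i ≤ len(text) is exactly "t <+: s.drop i"
-- (prefix of the i-th suffix), ported by hand; "for t in toks: … break / else" is List.find?.
def pvBscan : Nat → List Char → List (List Char) → Nat → List Char → List (List Char) → List (List Char)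
  | 0, _, _, _, buf, out => out ++ (if buf = [] then [] else [buf])
  | fuel+1, s, toks, i, buf, out =>
    if h : i < s.length then
      match toks.find? (fun t => decide (t <+: s.drop i)) with
      | some t => pvBscan fuel s toks (i + t.length) [] ((if buf = [] then out else out ++ [buf]) ++ [t])
      | none => pvBscan fuel s toks (i + 1) (buf ++ [s[i]'h]) out
    else out ++ (if buf = [] then [] else [buf])

def split_on_special_alt (text : String) (special_tokens : List String) : List String :=
  if special_tokens = [] then [text]
  else
    let toks := (PySem.List.sorted special_tokens (fun t => PySem.Str.len t) true).map String.toList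
    (pvBscan (text.toList.length + 1) text.toList toks 0 [] []).map (fun p => String.ofList p)

-- ===== PRECONDITION & SPEC =====
-- Pre_ excludes an empty-string special token combined with NONEMPTY text: there A (and B) loop
-- forever whenever some position matches no other token; in the remaining shadowed cases the two
-- programs still agree and return the same list, so the exclusion is only slightly wider than the
-- divergence region.
def Pre_split_on_special (text : String) (special_tokens : List String) : Prop :=
  "" ∈ special_tokens → text = ""
instance (text : String) (special_tokens : List String) : Decidable (Pre_split_on_special text special_tokens) := by unfold Pre_split_on_special; infer_instance

def pvWitness_split_on_special : String × List String := ("ab<|>cd<|><|>e", ["<|>", "<"])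

def Spec_split_on_special (text : String) (special_tokens : List String) (out : List String) : Prop := out = split_on_special_alt text special_tokens
instance (text : String) (special_tokens : List String) (out : List String) : Decidable (Spec_split_on_special text special_tokens out) := by unfold Spec_split_on_special; infer_instance

-- ===== CLAIM (what is proved, stated in full; the proofs are below) =====
def Claim_equal_split_on_special : Prop := ∀ (text : String) (special_tokens : List String), Dom_split_on_special text special_tokens → Pre_split_on_special text special_tokens → Spec_split_on_special text special_tokens (split_on_special text special_tokens)

-- ===== LEMMAS AND PROOFS =====

-- proof-side reference step: A's best-occurrence fold expressed on the suffix text[i:]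
def pvRefStep (rest : List Char) (acc : Int × Option (List Char)) (t : List Char) : Int × Option (List Char) :=
  let p := PySem.Chars.find rest t
  if p ≠ -1 ∧ (acc.1 = -1 ∨ p < acc.1) then (p, some t) else acc

theorem pvAmatchTok_eq (toks : List (List Char)) (s : List Char) (n : Nat) :
    pvAmatchTok toks s (n : Int) = toks.find? (fun t => decide (t <+: s.drop n)) := by
  induction toks with
  | nil => rfl
  | cons t ts ih =>
    simp only [pvAmatchTok, List.find?, PySem.List.slice_natCast_add s n t.length]
    have h : ((s.drop n).take t.length = t) = (t <+: s.drop n) := by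
      rw [List.prefix_iff_eq_take]; exact propext ⟨fun h => h.symm, fun h => h.symm⟩
    by_cases hp : t <+: s.drop n
    · simp [hp, h]
    · simp [hp, h, ih]

theorem pvBfold_gen (r : List Char) :
    ∀ (toks : List (List Char)) (acc : Int × Option (List Char)),
    (toks.foldl (pvRefStep r) acc = acc ∧
      ∀ t ∈ toks, PySem.Chars.find r t = -1 ∨ (acc.1 ≠ -1 ∧ acc.1 ≤ PySem.Chars.find r t)) ∨
    (∃ pre t post, toks = pre ++ t :: post ∧
      toks.foldl (pvRefStep r) acc = (PySem.Chars.find r t, some t) ∧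
      0 ≤ PySem.Chars.find r t ∧
      (acc.1 = -1 ∨ PySem.Chars.find r t < acc.1) ∧
      (∀ u ∈ pre, PySem.Chars.find r u = -1 ∨ PySem.Chars.find r t < PySem.Chars.find r u) ∧
      (∀ u ∈ toks, PySem.Chars.find r u = -1 ∨ PySem.Chars.find r t ≤ PySem.Chars.find r u)) := by
  intro toks
  induction toks with
  | nil => intro acc; left; simp
  | cons t ts ih =>
    intro acc
    by_cases hc : PySem.Chars.find r t ≠ -1 ∧ (acc.1 = -1 ∨ PySem.Chars.find r t < acc.1)
    · have hstep : pvRefStep r acc t = (PySem.Chars.find r t, some t) := by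
        simp [pvRefStep, hc]
      have hge : 0 ≤ PySem.Chars.find r t := by
        have := PySem.Chars.neg_one_le_find r t; omega
      rcases ih (PySem.Chars.find r t, some t) with ⟨heq, hall⟩ | ⟨pre, t', post, hdec, heq, h0, hlt, hpre, hmin⟩
      · right
        refine ⟨[], t, ts, by simp, ?_, hge, hc.2, by simp, ?_⟩
        · simp [List.foldl_cons, hstep, heq]
        · intro u hu
          rcases List.mem_cons.mp hu with rfl | hu
          · right; omega
          · rcases hall u hu with h | h
            · left; exact h
            · right; simpa using h.2
      · right
        refine ⟨t :: pre, t', post, by simp [hdec], ?_, h0, ?_, ?_, ?_⟩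
        · simp [List.foldl_cons, hstep, heq]
        · rcases hlt with h | h
          · simp at h; exact absurd h hc.1
          · simp at h
            rcases hc.2 with h2 | h2
            · left; exact h2
            · right; omega
        · intro u hu
          rcases List.mem_cons.mp hu with rfl | hu
          · rcases hlt with h | h
            · simp at h; exact absurd h hc.1
            · right; simpa using h
          · exact hpre u hu
        · intro u hu
          rcases List.mem_cons.mp hu with rfl | hu
          · rcases hlt with h | h
            · simp at h; exact absurd h hc.1
            · simp at h; right; omega
          · exact hmin u (by rcases (by simpa [hdec] using hu : u ∈ pre ∨ u = t' ∨ u ∈ post) with h|h|h <;> simp [hdec, h])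
    · have hstep : pvRefStep r acc t = acc := by
        simp only [pvRefStep]; rw [if_neg hc]
      have hkeep : PySem.Chars.find r t = -1 ∨ (acc.1 ≠ -1 ∧ acc.1 ≤ PySem.Chars.find r t) := by
        by_cases h1 : PySem.Chars.find r t = -1
        · left; exact h1
        · right; constructor
          · intro h2; exact hc ⟨h1, Or.inl h2⟩
          · by_contra h3
            exact hc ⟨h1, Or.inr (by omega)⟩
      rcases ih acc with ⟨heq, hall⟩ | ⟨pre, t', post, hdec, heq, h0, hlt, hpre, hmin⟩
      · left
        refine ⟨by simp [List.foldl_cons, hstep, heq], ?_⟩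
        intro u hu
        rcases List.mem_cons.mp hu with rfl | hu
        · exact hkeep
        · exact hall u hu
      · right
        refine ⟨t :: pre, t', post, by simp [hdec], ?_, h0, hlt, ?_, ?_⟩
        · simp [List.foldl_cons, hstep, heq]
        · intro u hu
          rcases List.mem_cons.mp hu with rfl | hu
          · rcases hkeep with h | h
            · left; exact h
            · rcases hlt with h2 | h2
              · exact absurd h2 h.1
              · right; omega
          · exact hpre u hu
        · intro u hu
          rcases List.mem_cons.mp hu with rfl | hu
          · rcases hkeep with h | h
            · left; exact h
            · rcases hlt with h2 | h2
              · exact absurd h2 h.1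
              · right; omega
          · exact hmin u (by rcases (by simpa [hdec] using hu : u ∈ pre ∨ u = t' ∨ u ∈ post) with h|h|h <;> simp [hdec, h])

theorem pv_find_pos_lt {r t : List Char} (ht : t ≠ []) (h0 : 0 ≤ PySem.Chars.find r t) :
    PySem.Chars.find r t < (r.length : Int) := by
  have hspec := (PySem.Chars.find_spec h0).1
  have hle := PySem.Chars.find_le_length r t
  rcases lt_or_eq_of_le hle with h | h
  · exact h
  · exfalso
    have : (PySem.Chars.find r t).toNat = r.length := by omega
    rw [this, List.drop_length] at hspec
    exact ht (List.prefix_nil.mp hspec)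

theorem pvAfindNext_link (s : List Char) (n : Nat) (hn : n ≤ s.length)
    (toks : List (List Char)) (htoks : ∀ t ∈ toks, t ≠ []) :
    ∀ accB : Int × Option (List Char), (accB.1 = -1 ∨ 0 ≤ accB.1) →
    toks.foldl (fun acc t =>
        let pos := PySem.Chars.findFrom s t (n : Int)
        if pos ≠ -1 ∧ pos < acc then pos else acc)
      (if accB.1 = -1 then (s.length : Int) else (n : Int) + accB.1)
    = (if (toks.foldl (pvRefStep (s.drop n)) accB).1 = -1 then (s.length : Int)
       else (n : Int) + (toks.foldl (pvRefStep (s.drop n)) accB).1) := by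
  induction toks with
  | nil => intro accB _; rfl
  | cons t ts ih =>
    intro accB hinv
    have hff := PySem.Chars.findFrom_natCast s t n hn
    have htne : t ≠ [] := htoks t (List.mem_cons_self)
    have hts : ∀ u ∈ ts, u ≠ [] := fun u hu => htoks u (List.mem_cons_of_mem _ hu)
    set F := PySem.Chars.find (s.drop n) t with hF
    simp only [List.foldl_cons]
    by_cases h1 : F = -1
    · have hstepA : (if PySem.Chars.findFrom s t (n:Int) ≠ -1 ∧
          PySem.Chars.findFrom s t (n:Int) < (if accB.1 = -1 then (s.length : Int) else (n : Int) + accB.1)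
          then PySem.Chars.findFrom s t (n:Int)
          else (if accB.1 = -1 then (s.length : Int) else (n : Int) + accB.1))
          = (if accB.1 = -1 then (s.length : Int) else (n : Int) + accB.1) := by
        rw [hff]; simp [h1]
      have hstepB : pvRefStep (s.drop n) accB t = accB := by
        simp [pvRefStep, ← hF, h1]
      simp only [hstepA, hstepB]
      exact (by exact ih hts accB hinv)
    · have h0 : 0 ≤ F := by have := PySem.Chars.neg_one_le_find (s.drop n) t; omega
      have hlt : F < ((s.drop n).length : Int) := pv_find_pos_lt htne h0
      have hlen : ((s.drop n).length : Int) = (s.length : Int) - n := by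
        simp [List.length_drop]; omega
      by_cases h2 : accB.1 = -1 ∨ F < accB.1
      · have hstepB : pvRefStep (s.drop n) accB t = (F, some t) := by
          simp only [pvRefStep, ← hF]
          rw [if_pos ⟨h1, h2⟩]
        have hcond : PySem.Chars.findFrom s t (n:Int) ≠ -1 ∧
            PySem.Chars.findFrom s t (n:Int) < (if accB.1 = -1 then (s.length : Int) else (n : Int) + accB.1) := by
          rw [hff]; simp [h1]
          constructor
          · omega
          · rcases h2 with h | h
            · simp [h]; omega
            · rcases hinv with h3 | h3
              · simp [h3]; omega
              · rw [if_neg (by omega)]; omega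
        rw [if_pos hcond, hff, if_neg h1, hstepB]
        have := ih hts (F, some t) (Or.inr h0)
        rw [if_neg (by simpa using (by omega : ¬ F = -1))] at this
        exact this
      · have hstepB : pvRefStep (s.drop n) accB t = accB := by
          simp only [pvRefStep, ← hF]
          rw [if_neg (by tauto)]
        have hcond : ¬ (PySem.Chars.findFrom s t (n:Int) ≠ -1 ∧
            PySem.Chars.findFrom s t (n:Int) < (if accB.1 = -1 then (s.length : Int) else (n : Int) + accB.1)) := by
          rw [hff, if_neg h1]
          push Not at h2 ⊢
          intro _
          rw [if_neg h2.1]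
          omega
        rw [if_neg hcond, hstepB]
        exact ih hts accB hinv

theorem pvAfindNext_eq (s : List Char) (n : Nat) (hn : n ≤ s.length)
    (toks : List (List Char)) (htoks : ∀ t ∈ toks, t ≠ []) :
    pvAfindNext s toks (n : Int) =
      (if (toks.foldl (pvRefStep (s.drop n)) (-1, none)).1 = -1 then (s.length : Int)
       else (n : Int) + (toks.foldl (pvRefStep (s.drop n)) (-1, none)).1) := by
  have h := pvAfindNext_link s n hn toks htoks (-1, none) (Or.inl rfl)
  simpa [pvAfindNext] using h

theorem pv_prefix_drop_find_le {u r : List Char} {i : Nat} (h : u <+: r.drop i) :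
    0 ≤ PySem.Chars.find r u ∧ PySem.Chars.find r u ≤ (i : Int) := by
  have hinf : u <:+: r := h.isInfix.trans (List.drop_suffix i r).isInfix
  have h0 : 0 ≤ PySem.Chars.find r u := (PySem.Chars.find_nonneg_iff r u).mpr hinf
  refine ⟨h0, ?_⟩
  have hspec := (PySem.Chars.find_spec h0).2
  by_contra hgt
  exact hspec i (by omega) h

-- B's output accumulator distributes
theorem pvBscan_out (fuel : Nat) : ∀ (s : List Char) (toks : List (List Char)) (i : Nat)
    (buf : List Char) (out : List (List Char)),
    pvBscan fuel s toks i buf out = out ++ pvBscan fuel s toks i buf [] := by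
  induction fuel with
  | zero => intro s toks i buf out; simp [pvBscan]
  | succ f ih =>
    intro s toks i buf out
    simp only [pvBscan]
    split
    · split
      · rename_i t _
        rw [ih s _ _ [] ((if buf = [] then out else out ++ [buf]) ++ [t]),
            ih s _ _ [] ((if buf = [] then ([] : List (List Char)) else [] ++ [buf]) ++ [t])]
        split <;> simp
      · rw [ih s _ _ _ out]
    · simp

-- over a match-free stretch B only accumulates characters into the buffer
theorem pvBscan_skip (s : List Char) (toks : List (List Char)) :
    ∀ (d n fb : Nat) (buf : List Char) (out : List (List Char)), n + d ≤ s.length →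
    (∀ j, n ≤ j → j < n + d → toks.find? (fun t => decide (t <+: s.drop j)) = none) →
    pvBscan (fb + d) s toks n buf out = pvBscan fb s toks (n + d) (buf ++ (s.drop n).take d) out := by
  intro d
  induction d with
  | zero => intro n fb buf out _ _; simp
  | succ d ih =>
    intro n fb buf out hle hnone
    have hn : n < s.length := by omega
    have hd : s.drop n = s[n] :: s.drop (n + 1) := List.drop_eq_getElem_cons hn
    have hstep : pvBscan (fb + (d + 1)) s toks n buf out
        = pvBscan (fb + d) s toks (n + 1) (buf ++ [s[n]]) out := by
      show pvBscan ((fb + d) + 1) s toks n buf out = _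
      simp only [pvBscan]
      rw [dif_pos hn, hnone n (le_refl n) (by omega)]
    have hbuf : buf ++ [s[n]] ++ (s.drop (n + 1)).take d = buf ++ (s.drop n).take (d + 1) := by
      conv_rhs => rw [hd]
      rw [List.take_succ_cons]
      simp only [List.append_assoc, List.singleton_append]
    rw [hstep, ih (n + 1) fb (buf ++ [s[n]]) out (by omega)
      (fun j hj1 hj2 => hnone j (by omega) (by omega)),
      show n + 1 + d = n + (d + 1) from by omega, hbuf]

theorem pv_main (s : List Char) (toks : List (List Char)) (htoks : ∀ t ∈ toks, t ≠ []) :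
    ∀ k, ∀ n fa fb, n ≤ s.length → s.length - n = k → k < fa → k < fb →
      (∀ res, pvAloop fa s toks (n : Int) res = res ++ pvBscan fb s toks n [] []) ∧
      (∀ p ∈ pvBscan fb s toks n [] [], p ≠ []) := by
  intro k
  induction k using Nat.strong_induction_on with
  | _ k IH =>
    intro n fa fb hn hk hfa hfb
    obtain ⟨fa', rfl⟩ : ∃ m, fa = m + 1 := ⟨fa - 1, by omega⟩
    obtain ⟨fb', rfl⟩ : ∃ m, fb = m + 1 := ⟨fb - 1, by omega⟩
    set r := s.drop n with hr
    rcases eq_or_lt_of_le hn with heq | hlt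
    · -- n = s.length : both loops exit immediately
      have hcondN : ¬ (n < s.length) := by omega
      have hcond : ¬ ((n : Int) < (s.length : Int)) := by exact_mod_cast hcondN
      have hB : pvBscan (fb' + 1) s toks n [] [] = [] := by
        simp only [pvBscan]
        rw [dif_neg hcondN]
        simp
      constructor
      · intro res
        simp only [pvAloop]
        rw [if_neg hcond, hB]
        simp
      · rw [hB]; simp
    · -- n < s.length
      have hrne : r ≠ [] := by
        rw [hr]; intro h; have := List.drop_eq_nil_iff.mp h; omega
      have hrlen : r.length = s.length - n := by rw [hr, List.length_drop]
      rcases hm : List.find? (fun t => decide (t <+: s.drop n)) toks with _ | t0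
      · -- no token matches at position n
        have hnone : ∀ t ∈ toks, ¬ t <+: r := by
          intro t ht
          have := List.find?_eq_none.mp hm t ht
          simpa [hr] using this
        have hlinkA := pvAfindNext_eq s n hn toks htoks
        rcases pvBfold_gen r toks (-1, none) with ⟨hfold, hall⟩ | ⟨pre, tstar, post, hdec, hfold, h0, _, hpre, hmin⟩
        · -- no token occurs anywhere in the rest: final chunk, then both stop
          have hall' : ∀ t ∈ toks, PySem.Chars.find r t = -1 := by
            intro t ht
            rcases hall t ht with h | h
            · exact h
            · exact absurd rfl h.1
          rw [← hr, hfold] at hlinkA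
          have hlink2A : pvAfindNext s toks (n : Int) = (s.length : Int) := by
            rw [hlinkA]; rfl
          have hnowhere : ∀ j, n ≤ j → j < s.length →
              toks.find? (fun t => decide (t <+: s.drop j)) = none := by
            intro j hj1 _
            apply List.find?_eq_none.mpr
            intro t ht hdec
            have hpref : t <+: s.drop j := of_decide_eq_true hdec
            have hdrop : s.drop j = r.drop (j - n) := by
              rw [hr, List.drop_drop]
              congr 1
              omega
            rw [hdrop] at hpref
            have h2 := pv_prefix_drop_find_le hpref
            have := hall' t ht
            omega
          have hslice : PySem.List.slice s (some (n : Int)) none = r := by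
            rw [PySem.List.slice_from_natCast, hr]
          have hchunk : PySem.List.slice s (some (n:Int)) (some (s.length : Int)) = r := by
            rw [show ((s.length : Int)) = ((s.length : Nat) : Int) from rfl,
               PySem.List.slice_natCast]
            rw [hr, ← List.length_drop]
            exact List.take_length
          have hfb1 : fb' + 1 = (fb' + 1 - k) + k := by omega
          have hB : pvBscan (fb' + 1) s toks n [] [] = [r] := by
            rw [hfb1, pvBscan_skip s toks k n (fb' + 1 - k) [] []
              (by omega) (by intro j hj1 hj2; exact hnowhere j hj1 (by omega))]
            obtain ⟨m, hmk⟩ : ∃ m, fb' + 1 - k = m + 1 := ⟨fb' - k, by omega⟩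
            rw [hmk,
              show ([] : List Char) ++ (s.drop n).take k = r from by
                rw [List.nil_append, show k = (s.drop n).length from by rw [List.length_drop]; omega,
                  List.take_length, hr]]
            simp only [pvBscan]
            rw [dif_neg (show ¬ (n + k < s.length) by omega), if_neg hrne]
            simp
          constructor
          · intro res
            simp only [pvAloop]
            rw [if_pos (by exact_mod_cast hlt)]
            simp only [pvAmatchTok_eq, hm]
            rw [hlink2A, if_pos (by exact_mod_cast hlt), hchunk]
            obtain ⟨fa'', rfl⟩ : ∃ m, fa' = m + 1 := ⟨fa' - 1, by omega⟩
            simp only [pvAloop]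
            rw [if_neg (show ¬ ((s.length : Int) < (s.length : Int)) by omega), hB]
          · rw [hB]
            simpa using hrne
        · -- leftmost occurrence at offset pn > 0 : chunk, then the token, then recurse
          have htstar : tstar ∈ toks := by simp [hdec]
          have htsne : tstar ≠ [] := htoks tstar htstar
          set p := PySem.Chars.find r tstar with hp
          obtain ⟨pn, hpn⟩ : ∃ m : Nat, p = (m : Int) := ⟨p.toNat, by omega⟩
          have hprefixp : tstar <+: r.drop pn := by
            have h2 := (PySem.Chars.find_spec (s := r) (sub := tstar) (by omega)).1
            rw [← hp, hpn] at h2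
            simpa using h2
          have hpnpos : 0 < pn := by
            rcases Nat.eq_zero_or_pos pn with h | h
            · exact absurd (by simpa [h] using hprefixp) (hnone tstar htstar)
            · exact h
          have hfit : pn + tstar.length ≤ r.length := by
            have h2 := hprefixp.length_le
            rw [List.length_drop] at h2
            have h3 : pn ≤ r.length := by
              by_contra h4
              rw [List.drop_eq_nil_iff.mpr (by omega)] at hprefixp
              exact htsne (List.prefix_nil.mp hprefixp)
            omega
          have htslen : 1 ≤ tstar.length := by
            cases tstar with
            | nil => exact absurd rfl htsne
            | cons a l => simp
          have hfoldpn : toks.foldl (pvRefStep r) (-1, none) = ((pn : Int), some tstar) := by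
            rw [hfold, hpn]
          rw [← hr, hfoldpn] at hlinkA
          have hlink2A : pvAfindNext s toks (n : Int) = ((n + pn : Nat) : Int) := by
            rw [hlinkA, if_neg (fun hc => by have hc2 : ((pn : Int)) = -1 := hc; omega)]
            push_cast; ring
          have hchunk : PySem.List.slice s (some (n:Int)) (some ((n + pn : Nat) : Int)) = r.take pn := by
            rw [PySem.List.slice_natCast, hr]
            congr 1
            omega
          -- no token matches at any position strictly before n + pn
          have hnomid : ∀ j, n ≤ j → j < n + pn →
              toks.find? (fun t => decide (t <+: s.drop j)) = none := by
            intro j hj1 hj2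
            apply List.find?_eq_none.mpr
            intro t ht hdec
            have hpref : t <+: s.drop j := of_decide_eq_true hdec
            have hdrop : s.drop j = r.drop (j - n) := by
              rw [hr, List.drop_drop]
              congr 1
              omega
            rw [hdrop] at hpref
            have h2 := pv_prefix_drop_find_le hpref
            rcases hmin t ht with h | h
            · omega
            · rw [hpn] at h
              have : (j - n : Int) < (pn : Int) := by
                have : j - n < pn := by omega
                exact_mod_cast this
              omega
          -- the first token matching at n + pn is tstar
          have hdrop2 : s.drop (n + pn) = r.drop pn := by
            rw [hr, List.drop_drop, Nat.add_comm]
          have hmatch2 : List.find? (fun t => decide (t <+: s.drop (n + pn))) toks = some tstar := by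
            rw [List.find?_eq_some_iff_append]
            refine ⟨by simp [hdrop2, hprefixp], pre, post, hdec, ?_⟩
            intro u hu
            simp only [Bool.not_eq_true', decide_eq_false_iff_not]
            intro hpref
            rw [hdrop2] at hpref
            have h2 := pv_prefix_drop_find_le hpref
            rcases hpre u hu with h | h
            · omega
            · rw [hpn] at h; omega
          have hbufne : r.take pn ≠ [] := by
            intro hnil
            rw [List.take_eq_nil_iff] at hnil
            rcases hnil with h | h
            · exact absurd h (by omega)
            · exact hrne h
          have hfb1 : fb' + 1 = (fb' + 1 - pn) + pn := by omega
          obtain ⟨m, hmk⟩ : ∃ m, fb' + 1 - pn = m + 1 := ⟨fb' - pn, by omega⟩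
          have hIH := IH (s.length - (n + pn + tstar.length)) (by omega) (n + pn + tstar.length)
            fa' m (by omega) rfl (by omega) (by omega)
          have hB : pvBscan (fb' + 1) s toks n [] []
              = [r.take pn] ++ [tstar] ++ pvBscan m s toks (n + pn + tstar.length) [] [] := by
            rw [hfb1, pvBscan_skip s toks pn n (fb' + 1 - pn) [] [] (by omega) hnomid, hmk,
              show ([] : List Char) ++ (s.drop n).take pn = r.take pn from by rw [List.nil_append, hr]]
            simp only [pvBscan]
            rw [dif_pos (show n + pn < s.length by omega)]
            simp only [hmatch2]
            rw [if_neg hbufne, pvBscan_out]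
            simp
          constructor
          · intro res
            simp only [pvAloop]
            rw [if_pos (by exact_mod_cast hlt)]
            simp only [pvAmatchTok_eq, hm]
            rw [hlink2A, if_pos (by exact_mod_cast (by omega : n < n + pn)), hchunk]
            obtain ⟨fa'', rfl⟩ : ∃ q, fa' = q + 1 := ⟨fa' - 1, by omega⟩
            simp only [pvAloop]
            rw [if_pos (by exact_mod_cast (by omega : n + pn < s.length))]
            simp only [pvAmatchTok_eq, hmatch2]
            rw [show ((n + pn : Nat) : Int) + (tstar.length : Int) = ((n + pn + tstar.length : Nat) : Int) from by push_cast; ring]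
            have hIH1 := (IH (s.length - (n + pn + tstar.length)) (by omega) (n + pn + tstar.length)
              fa'' m (by omega) rfl (by omega) (by omega)).1
            rw [hIH1 (res ++ [r.take pn] ++ [tstar]), hB]
            simp
          · rw [hB]
            intro q hq
            rcases List.mem_append.mp hq with hq | hq
            · rcases List.mem_append.mp hq with hq | hq
              · simp at hq; subst hq; exact hbufne
              · simp at hq; subst hq; exact htsne
            · exact hIH.2 q hq
      · -- a token matches at position n
        obtain ⟨hpref0, pre0, post0, hdec0, hpre0⟩ := List.find?_eq_some_iff_append.mp hm
        have hpref : t0 <+: s.drop n := by simpa using hpref0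
        have ht0 : t0 ∈ toks := by simp [hdec0]
        have ht0ne : t0 ≠ [] := htoks t0 ht0
        have ht0len : 1 ≤ t0.length := by
          cases t0 with
          | nil => exact absurd rfl ht0ne
          | cons a l => simp
        have h1len : t0.length ≤ r.length := by
          have := hpref.length_le
          rw [← hr] at this
          exact this
        have hIH := IH (s.length - (n + t0.length)) (by omega) (n + t0.length) fa' fb'
          (by omega) rfl (by omega) (by omega)
        have hB : pvBscan (fb' + 1) s toks n [] []
            = [t0] ++ pvBscan fb' s toks (n + t0.length) [] [] := by
          simp only [pvBscan]
          rw [dif_pos hlt]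
          simp only [hm]
          rw [pvBscan_out]
          simp
        constructor
        · intro res
          simp only [pvAloop]
          rw [if_pos (by exact_mod_cast hlt)]
          simp only [pvAmatchTok_eq, hm]
          rw [show ((n:Int) + (t0.length : Int)) = ((n + t0.length : Nat) : Int) from by push_cast; ring]
          rw [hIH.1 (res ++ [t0]), hB]
          simp
        · rw [hB]
          intro q hq
          rcases List.mem_append.mp hq with hq | hq
          · simp at hq; subst hq; exact ht0ne
          · exact hIH.2 q hq

-- ===== VERDICT (by name: the statement is the Claim_ definition above) =====
theorem split_on_special_spec : Claim_equal_split_on_special := by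
  intro text special_tokens _hdom hpre
  unfold Spec_split_on_special
  unfold Pre_split_on_special at hpre
  unfold split_on_special split_on_special_alt
  by_cases hemp : special_tokens = []
  · simp [hemp]
  · simp only [if_neg hemp]
    by_cases htext : text.toList = []
    · simp [htext, pvAloop, pvBscan]
    · have hpre' : "" ∉ special_tokens := by
        intro h
        exact htext (by simp [hpre h])
      set toks := (PySem.List.sorted special_tokens (fun t => PySem.Str.len t) true).map String.toList with htk
      have htoks : ∀ t ∈ toks, t ≠ [] := by
        intro t ht
        rw [htk] at ht
        obtain ⟨u, hu, rfl⟩ := List.mem_map.mp ht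
        have hmem := (PySem.List.mem_sorted _ _ _ _).mp hu
        intro hnil
        exact hpre' (by rwa [String.toList_eq_nil_iff.mp hnil] at hmem)
      have hmain := pv_main text.toList toks htoks text.toList.length 0
        (text.toList.length + 1) (text.toList.length + 1) (by omega) (by omega) (by omega) (by omega)
      have hA := hmain.1 []
      simp only [Nat.cast_zero, List.nil_append] at hA
      rw [hA]
      congr 1
      apply List.filter_eq_self.mpr
      intro q hq
      simp only [ne_eq, decide_not, Bool.not_eq_eq_eq_not, Bool.not_true, decide_eq_false_iff_not]
      intro hnil
      exact hmain.2 q hq hnil
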